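-- pv_equiv track=rewrite | github.com/borox345/oij | d_pod/pod9.py | divisibilityBy9
-- ===== SOURCE A (Python) =====
-- def convert(list):
--     s = [str(i) for i in list]
--
--     res = int("".join(s))
--
--     return res
--
-- def divisibilityBy9(n):
--     splited_number = [int(x) for x in str(n)]
--     splited_number[0] = 1
--
--     final_number = convert(splited_number)
--
--     while final_number % 9 != 0 and splited_number[0] < 9:
--         splited_number[0] += 1
--         final_number = convert(splited_number)
--
--     return final_number
-- ===== SOURCE B (Python) =====
-- def divisibilityBy9(n):
--     digits = [int(x) for x in str(n)]
--     rest = sum(digits[1:]) % 9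
--     digits[0] = (-rest - 1) % 9 + 1
--     return int("".join(str(d) for d in digits))
-- ===== Notes on version B (the rewrite author's own statement) =====
-- stated objective: simpler
-- what changed: Replaces A's trial loop that tries leading digits 1..9 until the joined number is divisible by 9 with a closed-form computation of the leading digit from the mod-9 digit sum of the remaining digits.
import Mathlib
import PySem

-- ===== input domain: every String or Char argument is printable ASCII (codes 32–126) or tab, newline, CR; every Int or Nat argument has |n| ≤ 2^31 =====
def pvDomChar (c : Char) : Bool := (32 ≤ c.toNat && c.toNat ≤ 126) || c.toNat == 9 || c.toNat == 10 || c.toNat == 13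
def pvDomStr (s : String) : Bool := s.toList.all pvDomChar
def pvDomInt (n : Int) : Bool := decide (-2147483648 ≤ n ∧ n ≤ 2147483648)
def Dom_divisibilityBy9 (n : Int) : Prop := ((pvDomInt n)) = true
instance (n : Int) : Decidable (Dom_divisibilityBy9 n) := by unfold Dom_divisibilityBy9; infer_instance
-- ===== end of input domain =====

-- B replaces A's trial loop over leading digits 1..9 by a closed-form mod-9 formula for the
-- required leading digit (objective: simpler — no candidate loop).


-- ===== PORT A =====
-- int(x) for a single digit character x: exact whenever '0' ≤ x ≤ '9', which is the only way
-- either program calls it (Pre_ restricts to n ≥ 0, so str(n) is all digit characters).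
def pvDigitVal (c : Char) : Int := (c.toNat : Int) - 48

-- Python's  int("".join([str(i) for i in l]))  (A's helper `convert`, and B's return line):
-- str(i) is PySem.Int.toChars, "".join is flatten, and int() is ported by hand as the base-10
-- left fold over the digit characters — exact for the nonempty all-digit strings these
-- programs join (every element of l is a single decimal digit 0..9).
def pvJoinInt (l : List Int) : Int :=
  ((l.map PySem.Int.toChars).flatten).foldl (fun a c => 10 * a + pvDigitVal c) 0

-- the while loop of A; fuel 8 is exact: splited_number[0] starts at 1 and the guard
-- splited_number[0] < 9 stops the loop after at most 8 increments.
def pvLoopA : Nat → List Int → Int → Int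
  | 0, _, fn => fn
  | fuel + 1, sp, fn =>
    if PySem.Int.mod fn 9 ≠ 0 ∧ sp.headD 0 < 9 then
      let sp' := sp.set 0 (sp.headD 0 + 1)
      pvLoopA fuel sp' (pvJoinInt sp')
    else fn

def divisibilityBy9 (n : Int) : Int :=
  let splited := (PySem.Int.toChars n).map pvDigitVal   -- [int(x) for x in str(n)]
  let splited := splited.set 0 1                        -- splited_number[0] = 1
  let final := pvJoinInt splited                        -- final_number = convert(splited_number)
  pvLoopA 8 splited final

-- ===== PORT B =====
def divisibilityBy9_alt (n : Int) : Int :=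
  let digits := (PySem.Int.toChars n).map pvDigitVal            -- [int(x) for x in str(n)]
  let rest := PySem.Int.mod ((PySem.List.slice digits (some 1) none).sum) 9   -- sum(digits[1:]) % 9
  let digits := digits.set 0 (PySem.Int.mod (-rest - 1) 9 + 1)  -- digits[0] = (-rest - 1) % 9 + 1
  pvJoinInt digits                                              -- int("".join(str(d) for d in digits))

-- ===== PRECONDITION & SPEC =====
-- Pre_ excludes exactly n < 0, where str(n) starts with '-' and int('-') raises ValueError in A.
def Pre_divisibilityBy9 (n : Int) : Prop := 0 ≤ n
instance (n : Int) : Decidable (Pre_divisibilityBy9 n) := by unfold Pre_divisibilityBy9; infer_instance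
def pvWitness_divisibilityBy9 : Int := 5

def Spec_divisibilityBy9 (n : Int) (out : Int) : Prop := out = divisibilityBy9_alt n
instance (n : Int) (out : Int) : Decidable (Spec_divisibilityBy9 n out) := by unfold Spec_divisibilityBy9; infer_instance

-- ===== CLAIM (what is proved, stated in full; the proofs are below) =====
def Claim_equal_divisibilityBy9 : Prop := ∀ (n : Int), Dom_divisibilityBy9 n → Pre_divisibilityBy9 n → Spec_divisibilityBy9 n (divisibilityBy9 n)

-- ===== LEMMAS AND PROOFS =====

-- a list of single digits 0..9
def pvDigits (l : List Int) : Prop := ∀ d ∈ l, 0 ≤ d ∧ d ≤ 9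

-- str(d) of a single digit is one character whose digit value is d
theorem pvToChars_digit (d : Int) (h0 : 0 ≤ d) (h9 : d ≤ 9) :
    ∃ c, PySem.Int.toChars d = [c] ∧ pvDigitVal c = d := by
  interval_cases d <;> exact ⟨_, rfl, rfl⟩

-- pvJoinInt is the base-10 fold over the digit list itself
theorem pvJoinInt_foldl_acc (l : List Int) (h : pvDigits l) (acc : Int) :
    ((l.map PySem.Int.toChars).flatten).foldl (fun a c => 10 * a + pvDigitVal c) acc
      = l.foldl (fun a d => 10 * a + d) acc := by
  induction l generalizing acc with
  | nil => rfl
  | cons d t ih =>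
    obtain ⟨c, hc, hv⟩ := pvToChars_digit d (h d (by simp)).1 (h d (by simp)).2
    simp only [List.map_cons, List.flatten_cons, hc, List.foldl_append, List.foldl_cons,
      List.foldl_nil, List.foldl_cons, hv]
    exact ih (fun d hd => h d (by simp [hd])) _

theorem pvJoinInt_foldl (l : List Int) (h : pvDigits l) :
    pvJoinInt l = l.foldl (fun a d => 10 * a + d) 0 := pvJoinInt_foldl_acc l h 0

theorem pvFoldl_mod9 (l : List Int) (acc : Int) :
    (l.foldl (fun a d => 10 * a + d) acc) % 9 = (acc + l.sum) % 9 := by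
  induction l generalizing acc with
  | nil => simp
  | cons d t ih =>
    simp only [List.foldl_cons, List.sum_cons, ih]
    omega

theorem pvJoin_mod9 (l : List Int) (h : pvDigits l) :
    PySem.Int.mod (pvJoinInt l) 9 = (l.sum) % 9 := by
  rw [PySem.Int.mod_eq_emod_of_pos (by omega), pvJoinInt_foldl l h, pvFoldl_mod9]
  simp

-- the leading digit B chooses, as a function of the tail
def pvD (t : List Int) : Int := PySem.Int.mod (-(PySem.Int.mod t.sum 9) - 1) 9 + 1

theorem pvD_range (t : List Int) : 1 ≤ pvD t ∧ pvD t ≤ 9 := by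
  unfold pvD
  have h1 := PySem.Int.mod_nonneg (-(PySem.Int.mod t.sum 9) - 1) (b := 9) (by omega)
  have h2 := PySem.Int.mod_lt (-(PySem.Int.mod t.sum 9) - 1) (b := 9) (by omega)
  omega

theorem pvD_hits (t : List Int) : (pvD t + t.sum) % 9 = 0 := by
  unfold pvD
  rw [PySem.Int.mod_eq_emod_of_pos (by omega), PySem.Int.mod_eq_emod_of_pos (by omega)]
  omega

theorem pvD_first (t : List Int) (x : Int) (h1 : 1 ≤ x) (h2 : x < pvD t) :
    (x + t.sum) % 9 ≠ 0 := by
  have h9 := (pvD_range t).2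
  have hh := pvD_hits t
  omega

-- the loop invariant: from leading digit x ≤ pvD t with enough fuel, A's loop returns
-- the joined number with leading digit pvD t
theorem pvLoopA_eq (fuel : Nat) (t : List Int) (ht : pvDigits t) (x : Int)
    (h1 : 1 ≤ x) (h2 : x ≤ pvD t) (hf : (pvD t - x).toNat ≤ fuel) :
    pvLoopA fuel (x :: t) (pvJoinInt (x :: t)) = pvJoinInt (pvD t :: t) := by
  induction fuel generalizing x with
  | zero =>
    have : x = pvD t := by omega
    subst this; rfl
  | succ fuel ih =>
    have hxt : pvDigits (x :: t) := by
      intro d hd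
      rcases List.mem_cons.mp hd with h | h
      · subst h; exact ⟨by omega, le_trans h2 (pvD_range t).2⟩
      · exact ht d h
    have hmod : PySem.Int.mod (pvJoinInt (x :: t)) 9 = (x + t.sum) % 9 := by
      rw [pvJoin_mod9 _ hxt]; simp
    by_cases hx : x = pvD t
    · subst hx
      unfold pvLoopA
      rw [if_neg]
      simp only [hmod, pvD_hits, ne_eq, not_true_eq_false, false_and, not_false_eq_true]
    · have hlt : x < pvD t := lt_of_le_of_ne h2 hx
      unfold pvLoopA
      rw [if_pos ⟨by rw [hmod]; exact pvD_first t x h1 hlt,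
            by simp only [List.headD_cons]; have := (pvD_range t).2; omega⟩]
      simp only [List.headD_cons, List.set_cons_zero]
      exact ih (x + 1) (by omega) (by omega) (by omega)

-- ===== VERDICT (by name: the statement is the Claim_ definition above) =====
theorem divisibilityBy9_spec : Claim_equal_divisibilityBy9 := by
  intro n _ hpre
  unfold Spec_divisibilityBy9 divisibilityBy9 divisibilityBy9_alt
  have hcs : PySem.Int.toChars n = Nat.toDigits 10 n.toNat := by
    unfold PySem.Int.toChars
    rw [if_neg (by exact not_lt.mpr hpre)]
  have hdig : ∀ d ∈ (PySem.Int.toChars n).map pvDigitVal, 0 ≤ d ∧ d ≤ 9 := by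
    intro d hd
    obtain ⟨c, hc, hv⟩ := List.mem_map.mp hd
    rw [hcs] at hc
    have hdig := Nat.isDigit_of_mem_toDigits (by omega) (by omega) hc
    simp only [Char.isDigit, UInt32.le_iff_toNat_le, Bool.and_eq_true, decide_eq_true_eq,
      show ('0' : Char).val.toNat = 48 from rfl, show ('9' : Char).val.toNat = 57 from rfl] at hdig
    unfold pvDigitVal at hv
    simp only [Char.toNat] at hv
    subst hv
    omega
  obtain ⟨h0, tt, hht⟩ : ∃ h0 tt, (PySem.Int.toChars n).map pvDigitVal = h0 :: tt := by
    have hlen : 0 < (PySem.Int.toChars n).length := by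
      rw [hcs]; exact Nat.length_toDigits_pos
    cases hmap : (PySem.Int.toChars n).map pvDigitVal with
    | nil => simp at hmap; simp [hmap] at hlen
    | cons a b => exact ⟨a, b, rfl⟩
  have htt : pvDigits tt := by
    intro d hd
    exact hdig d (by rw [hht]; exact List.mem_cons_of_mem _ hd)
  simp only [hht, List.set_cons_zero, PySem.List.slice_from_one, List.tail_cons]
  exact (pvLoopA_eq 8 tt htt 1 (by omega) (pvD_range tt).1
    (by have := pvD_range tt; omega)).symm ▸
    congrArg (fun d => pvJoinInt (d :: tt)) rfl
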